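-- pv_equiv track=rewrite | github.com/openview2017/leetcode-group-solution | InterViewQuestions/PhoneAndOnsite/Meta/Number of pairs in two arrays/Solution.py | getNumOfPairs
-- ===== SOURCE A (Python) =====
-- def getNumOfPairs(array1, array2):
--     if len(array1) != len(array2):
--         raise ValueError
--     result_dict = dict()
--     for i in range(len(array1)):
--         key = array1[i] + array2[i]
--         if key in result_dict:
--             result_dict[key] += 1
--         else:
--             result_dict[key] = 1
--     pairs = 0
--     for key, val in result_dict.items():
--         pairs += (val+1) * val // 2
--     return pairs
-- ===== SOURCE B (Python) =====
-- def getNumOfPairs(array1, array2):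
--     if len(array1) != len(array2):
--         raise ValueError
--     sums = sorted(a + b for a, b in zip(array1, array2))
--     pairs = 0
--     run = 0
--     prev = 0
--     for v in sums:
--         if run > 0 and v == prev:
--             run += 1
--         else:
--             pairs += run * (run + 1) // 2
--             run = 1
--             prev = v
--     return pairs + run * (run + 1) // 2
-- ===== Notes on version B (the rewrite author's own statement) =====
-- stated objective: alternative
-- what changed: Replaced the hash-map frequency count with a sort of the pairwise sums followed by a single run-length sweep that adds run*(run+1)//2 at each value change; no dict is used.
import Mathlib
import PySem

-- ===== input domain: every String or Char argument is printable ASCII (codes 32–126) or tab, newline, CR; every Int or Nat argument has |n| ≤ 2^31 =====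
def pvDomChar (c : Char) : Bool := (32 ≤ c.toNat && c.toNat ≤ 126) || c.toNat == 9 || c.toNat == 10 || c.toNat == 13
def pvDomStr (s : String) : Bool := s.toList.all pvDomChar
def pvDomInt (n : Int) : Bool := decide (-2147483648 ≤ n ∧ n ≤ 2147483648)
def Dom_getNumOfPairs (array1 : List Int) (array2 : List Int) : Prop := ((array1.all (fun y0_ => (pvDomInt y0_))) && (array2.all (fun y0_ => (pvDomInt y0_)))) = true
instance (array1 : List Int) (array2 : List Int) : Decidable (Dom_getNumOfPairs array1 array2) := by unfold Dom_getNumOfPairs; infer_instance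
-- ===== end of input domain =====

-- B replaces A's dict of frequencies by sorting the pairwise sums and sweeping runs of
-- equal values, adding run*(run+1)//2 per run; same return value, no speed claim.

-- ===== PORT A =====
def getNumOfPairs (array1 : List Int) (array2 : List Int) : Int :=
  if array1.length ≠ array2.length then 0  -- Python raises ValueError here; excluded by Pre_
  else
    let rd := (PySem.List.pyRange 0 (array1.length : Int) 1).foldl
      (fun (d : PySem.Dict Int Int) i =>
        let key := PySem.List.pyGetD array1 i 0 + PySem.List.pyGetD array2 i 0
        if d.contains key then d.insert key (d.getD key 0 + 1) else d.insert key 1)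
      PySem.Dict.empty
    rd.items.foldl (fun pairs kv => pairs + PySem.Int.floordiv ((kv.2 + 1) * kv.2) 2) 0

-- ===== PORT B =====
-- one step of B's sweep over the sorted sums: state = (pairs, run, prev)
def bStep (s : Int × Int × Int) (v : Int) : Int × Int × Int :=
  if 0 < s.2.1 ∧ v = s.2.2 then (s.1, s.2.1 + 1, s.2.2)
  else (s.1 + PySem.Int.floordiv (s.2.1 * (s.2.1 + 1)) 2, 1, v)

def getNumOfPairs_alt (array1 : List Int) (array2 : List Int) : Int :=
  if array1.length ≠ array2.length then 0  -- B raises ValueError here too; excluded by Pre_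
  else
    let sums := PySem.List.sorted (List.zipWith (fun a b => a + b) array1 array2) (fun x => x) false
    let st := sums.foldl bStep (0, 0, 0)
    st.1 + PySem.Int.floordiv (st.2.1 * (st.2.1 + 1)) 2

-- ===== PRECONDITION & SPEC =====
-- Pre_ excludes exactly the inputs of unequal length, on which A (and B) raise ValueError.
def Pre_getNumOfPairs (array1 : List Int) (array2 : List Int) : Prop :=
  array1.length = array2.length
instance (array1 : List Int) (array2 : List Int) : Decidable (Pre_getNumOfPairs array1 array2) := by unfold Pre_getNumOfPairs; infer_instance
def pvWitness_getNumOfPairs : List Int × List Int := ([1, 2, -3], [2, 1, 6])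

def Spec_getNumOfPairs (array1 : List Int) (array2 : List Int) (out : Int) : Prop := out = getNumOfPairs_alt array1 array2
instance (array1 : List Int) (array2 : List Int) (out : Int) : Decidable (Spec_getNumOfPairs array1 array2 out) := by unfold Spec_getNumOfPairs; infer_instance

-- ===== CLAIM (what is proved, stated in full; the proofs are below) =====
def Claim_equal_getNumOfPairs : Prop := ∀ (array1 : List Int) (array2 : List Int), Dom_getNumOfPairs array1 array2 → Pre_getNumOfPairs array1 array2 → Spec_getNumOfPairs array1 array2 (getNumOfPairs array1 array2)

-- ===== LEMMAS AND PROOFS =====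

-- T r = r*(r+1)//2, the per-run triangular count
def pvT (r : Int) : Int := PySem.Int.floordiv (r * (r + 1)) 2

-- canonical value: sum over the distinct sums of T(multiplicity)
def pvD (m : List Int) : Int := ∑ v ∈ m.toFinset, pvT (m.count v)

lemma pvD_nil : pvD [] = 0 := by simp [pvD]

lemma filter_ne_toFinset (s : Int) (m : List Int) :
    (m.filter (fun x => x ≠ s)).toFinset = m.toFinset.erase s := by
  ext v; simp; tauto

lemma pvD_cons (s : Int) (m : List Int) :
    pvD (s :: m) = pvT (1 + (m.count s : Int)) + pvD (m.filter (fun x => x ≠ s)) := by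
  unfold pvD
  have h1 : (s :: m).toFinset = insert s (m.toFinset.erase s) := by
    ext v; simp; by_cases hv : v = s <;> simp [hv]
  rw [h1, Finset.sum_insert (Finset.notMem_erase s m.toFinset)]
  rw [filter_ne_toFinset]
  congr 1
  · simp [List.count_cons_self]; ring_nf
  · apply Finset.sum_congr rfl
    intro v hv
    have hvs : v ≠ s := Finset.ne_of_mem_erase hv
    rw [List.count_filter (by simp [hvs])]
    simp [Ne.symm hvs]

lemma sweep_gen (l : List Int) :  ∀ (p run prev : Int),
    l.Pairwise (· ≤ ·) → (∀ x ∈ l, prev ≤ x) → 0 < run →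
    (let st := l.foldl bStep (p, run, prev);
     st.1 + PySem.Int.floordiv (st.2.1 * (st.2.1 + 1)) 2)
      = p + pvT (run + (l.count prev : Int)) + pvD (l.filter (fun x => x ≠ prev)) := by
  induction l with
  | nil => intro p run prev _ _ _; simp [pvD_nil, pvT]
  | cons s rest ih =>
    intro p run prev hs hge hrun
    have hges : ∀ x ∈ rest, s ≤ x := fun x hx => List.rel_of_pairwise_cons hs hx
    by_cases hsp : s = prev
    · have hstep : bStep (p, run, prev) s = (p, run + 1, prev) := by
        simp [bStep, hrun, hsp]
      simp only [List.foldl_cons, hstep]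
      rw [ih p (run + 1) prev hs.of_cons (fun x hx => hsp ▸ hges x hx) (by omega)]
      have hcnt : ((s :: rest).count prev : Int) = (rest.count prev : Int) + 1 := by
        simp [hsp]
      have hfil : (s :: rest).filter (fun x => x ≠ prev) = rest.filter (fun x => x ≠ prev) := by
        simp [hsp]
      rw [hcnt, hfil]
      ring_nf
    · have hstep : bStep (p, run, prev) s = (p + PySem.Int.floordiv (run * (run + 1)) 2, 1, s) := by
        simp [bStep, hsp]
      have hprevle : prev ≤ s := hge s (by simp)
      have hprevlt : prev < s := lt_of_le_of_ne hprevle (fun e => hsp e.symm)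
      have hlt : ∀ x ∈ rest, prev < x := fun x hx => lt_of_lt_of_le hprevlt (hges x hx)
      simp only [List.foldl_cons, hstep]
      rw [ih (p + PySem.Int.floordiv (run * (run + 1)) 2) 1 s hs.of_cons hges (by omega)]
      have hc0 : rest.count prev = 0 := by
        rw [List.count_eq_zero]
        intro hmem; exact absurd rfl (ne_of_gt (hlt prev hmem))
      have hcnt : (s :: rest).count prev = 0 := by
        simp [hc0, hsp]
      have hfilter : (s :: rest).filter (fun x => x ≠ prev) = s :: rest := by
        rw [List.filter_eq_self]
        intro x hx
        simp at hx ⊢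
        rcases hx with rfl | hx
        · exact hsp
        · exact ne_of_gt (hlt x hx)
      rw [hfilter, hcnt, pvD_cons s rest]
      push_cast
      unfold pvT
      ring_nf

lemma pvD_perm {l l2 : List Int} (h : l.Perm l2) : pvD l = pvD l2 := by
  unfold pvD
  rw [List.toFinset_eq_of_perm l l2 h]
  exact Finset.sum_congr rfl (fun v _ => by rw [h.count_eq])

lemma alt_eq_pvD (array1 array2 : List Int) (h : array1.length = array2.length) :
    getNumOfPairs_alt array1 array2 = pvD (List.zipWith (fun a b => a + b) array1 array2) := by
  unfold getNumOfPairs_alt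
  rw [if_neg (by omega)]
  set zs := List.zipWith (fun a b => a + b) array1 array2 with hzs
  set ss := PySem.List.sorted zs (fun x => x) false with hss
  have hperm : ss.Perm zs := PySem.List.sorted_perm zs (fun x => x) false
  have hpair : ss.Pairwise (· ≤ ·) := PySem.List.sorted_pairwise zs (fun x => x)
  rw [← pvD_perm hperm]
  match hm : ss with
  | [] => simp [pvD_nil]
  | s :: t =>
    have hstep : bStep (0, 0, 0) s = (0 + PySem.Int.floordiv (0 * (0 + 1)) 2, 1, s) := by
      simp [bStep]
    simp only [List.foldl_cons, hstep]
    have := sweep_gen t (0 + PySem.Int.floordiv (0 * (0 + 1)) 2) 1 s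
      (hpair.of_cons)
      (fun x hx => List.rel_of_pairwise_cons hpair hx)
      (by omega)
    simp only at this
    rw [this, pvD_cons s t]
    unfold pvT
    norm_num

lemma a_eq_pvD (array1 array2 : List Int) (h : array1.length = array2.length) :
    getNumOfPairs array1 array2 = pvD (List.zipWith (fun a b => a + b) array1 array2) := by
  unfold getNumOfPairs
  rw [if_neg (by omega)]
  set zs := List.zipWith (fun a b => a + b) array1 array2 with hzs
  have hlen : (array1.length : Int) = (zs.length : Int) := by
    simp [hzs, List.length_zipWith, h]
  rw [hlen]
  have hcongr : (PySem.List.pyRange 0 (zs.length : Int) 1).foldl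
      (fun (d : PySem.Dict Int Int) i =>
        let key := PySem.List.pyGetD array1 i 0 + PySem.List.pyGetD array2 i 0
        if d.contains key then d.insert key (d.getD key 0 + 1) else d.insert key 1)
      PySem.Dict.empty
      = (PySem.List.pyRange 0 (zs.length : Int) 1).foldl
      (fun (d : PySem.Dict Int Int) i => d.insert (PySem.List.pyGetD zs i 0) (d.getD (PySem.List.pyGetD zs i 0) 0 + 1))
      PySem.Dict.empty := by
    apply PySem.List.foldl_congr_mem
    intro d i hi
    rw [PySem.List.mem_pyRange_one] at hi
    have h1 : i < (array1.length : Int) := by omega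
    have hkey : PySem.List.pyGetD array1 i 0 + PySem.List.pyGetD array2 i 0
        = PySem.List.pyGetD zs i 0 := by
      rw [PySem.List.pyGetD_eq_getElem array1 0 hi.1 h1,
          PySem.List.pyGetD_eq_getElem array2 0 hi.1 (by omega),
          PySem.List.pyGetD_eq_getElem zs 0 hi.1 (by omega)]
      simp [hzs]
    simp only [hkey]
    by_cases hc : d.contains (PySem.List.pyGetD zs i 0)
    · simp [hc]
    · rw [if_neg hc, PySem.Dict.getD_of_not_contains d 0 (by simpa using hc)]
      norm_num
  rw [hcongr, PySem.List.foldl_pyRange_zero_pyGetD' zs 0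
        (fun (d : PySem.Dict Int Int) k => d.insert k (d.getD k 0 + 1)) PySem.Dict.empty,
      PySem.Dict.foldl_insert_getD_add_one_eq_counter zs,
      ]
  show (PySem.Dict.counter zs).items.foldl _ 0 = _
  rw [PySem.Dict.items_counter zs, PySem.List.foldl_add]
  rw [List.map_map]
  unfold pvD
  have hfun : ((fun kv : Int × Int => PySem.Int.floordiv ((kv.2 + 1) * kv.2) 2) ∘ fun k => (k, (List.count k zs : Int)))
      = fun k => pvT ((zs.count k : Int)) := by
    funext k; simp [pvT, Function.comp]; ring_nf
  rw [hfun, ← List.sum_toFinset (fun k => pvT ((zs.count k : Int))) (PySem.Set.nodup_ofList zs)]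
  have hts : (PySem.Set.ofList zs).toFinset = zs.toFinset := by
    ext v; simp [PySem.Set.mem_ofList]
  rw [hts, zero_add]

-- ===== VERDICT (by name: the statement is the Claim_ definition above) =====
theorem getNumOfPairs_spec : Claim_equal_getNumOfPairs := by
  intro a1 a2 _ hpre
  unfold Spec_getNumOfPairs
  rw [a_eq_pvD a1 a2 hpre, alt_eq_pvD a1 a2 hpre]
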